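-- pv_equiv track=rewrite | github.com/mohankaran-03/ai-sports | exercise_engine.py | count_squats
-- ===== SOURCE A (Python) =====
-- def count_squats(knee_angles):
--     counter = 0
--     stage = None
--     for angle in knee_angles:
--         if angle < 90:
--             stage = "down"
--         if angle > 170 and stage == "down":
--             stage = "up"
--             counter += 1
--     return counter
-- ===== SOURCE B (Python) =====
-- def count_squats(knee_angles):
--     # parse angles into an event stream, collapse runs, count down->up transitions
--     events = []
--     for a in knee_angles:
--         if a < 90:
--             events.append("down")
--         elif a > 170:
--             events.append("up")
--     collapsed = []
--     for e in events:
--         if not collapsed or collapsed[-1] != e: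
--             collapsed.append(e)
--     return sum(1 for x, y in zip(collapsed, collapsed[1:])
--                if x == "down" and y == "up")
-- ===== Notes on version B (the rewrite author's own statement) =====
-- stated objective: alternative
-- what changed: Replaces the mutable stage-flag state machine with a three-stage pipeline: classify angles into down/up events, collapse consecutive duplicate events, then count adjacent down->up pairs.
import Mathlib
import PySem

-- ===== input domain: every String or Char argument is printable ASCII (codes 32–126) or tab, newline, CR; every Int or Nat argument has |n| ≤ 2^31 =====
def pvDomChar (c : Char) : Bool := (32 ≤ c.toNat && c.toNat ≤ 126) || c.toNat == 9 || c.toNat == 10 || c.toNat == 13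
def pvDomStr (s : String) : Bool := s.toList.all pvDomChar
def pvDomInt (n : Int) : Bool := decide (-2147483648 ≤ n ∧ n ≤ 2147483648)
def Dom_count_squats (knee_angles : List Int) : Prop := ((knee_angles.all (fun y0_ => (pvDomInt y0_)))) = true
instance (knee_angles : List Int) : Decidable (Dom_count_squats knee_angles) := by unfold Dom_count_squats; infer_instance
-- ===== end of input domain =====

-- ===== PORT A =====
-- Port of A: single fold carrying (counter, stage), stage ∈ {none, "down", "up"}.
def count_squats (knee_angles : List Int) : Int :=
  (knee_angles.foldl
    (fun (s : Int × Option String) angle =>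
      let stage := if angle < 90 then some "down" else s.2
      if angle > 170 ∧ stage = some "down" then (s.1 + 1, some "up") else (s.1, stage))
    (0, none)).1

-- ===== PORT B =====
-- B's pipeline: classify each angle into an event ("down" if < 90, "up" if > 170, dropped otherwise) …
def cs_event (a : Int) : Option String :=
  if a < 90 then some "down" else if a > 170 then some "up" else none

def cs_events (l : List Int) : List String := l.filterMap cs_event

-- … collapse consecutive duplicates (B's loop appends e when it differs from the last appended) …
def cs_collapseGo (p : String) : List String → List String
  | [] => []
  | x :: xs => if x = p then cs_collapseGo p xs else x :: cs_collapseGo x xs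

def cs_collapse : List String → List String
  | [] => []
  | x :: xs => x :: cs_collapseGo x xs

-- … and count adjacent "down" → "up" pairs (B's zip/sum).
def cs_countDU : List String → Int
  | x :: y :: rest => (if x = "down" ∧ y = "up" then 1 else 0) + cs_countDU (y :: rest)
  | _ => 0

def count_squats_alt (knee_angles : List Int) : Int :=
  cs_countDU (cs_collapse (cs_events knee_angles))

-- ===== PRECONDITION & SPEC =====
def Spec_count_squats (knee_angles : List Int) (out : Int) : Prop := out = count_squats_alt knee_angles
instance (knee_angles : List Int) (out : Int) : Decidable (Spec_count_squats knee_angles out) := by unfold Spec_count_squats; infer_instance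

-- ===== CLAIM (what is proved, stated in full; the proofs are below) =====
def Claim_equal_count_squats : Prop := ∀ (knee_angles : List Int), Dom_count_squats knee_angles → Spec_count_squats knee_angles (count_squats knee_angles)

-- ===== LEMMAS AND PROOFS =====

-- reference count: h d l = reps counted from the rest of the stream when "stage is down" = d
def cs_h (d : Bool) : List Int → Int
  | [] => 0
  | a :: l =>
    if a < 90 then cs_h true l
    else if a > 170 then (if d then 1 + cs_h false l else cs_h d l)
    else cs_h d l

theorem cs_A_loop (l : List Int) (c : Int) (st : Option String) :
    (l.foldl
      (fun (s : Int × Option String) angle =>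
        let stage := if angle < 90 then some "down" else s.2
        if angle > 170 ∧ stage = some "down" then (s.1 + 1, some "up") else (s.1, stage))
      (c, st)).1 = c + cs_h (decide (st = some "down")) l := by
  induction l generalizing c st with
  | nil => simp [cs_h]
  | cons a l ih =>
    simp only [List.foldl, cs_h]
    split_ifs with h1 h2 h2 h3 <;>
      simp_all <;> omega

theorem cs_events_cons (a : Int) (l : List Int) :
    cs_events (a :: l) =
      if a < 90 then "down" :: cs_events l
      else if a > 170 then "up" :: cs_events l
      else cs_events l := by
  simp only [cs_events, List.filterMap, cs_event]
  split_ifs <;> rfl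

theorem cs_B_go (l : List Int) (p : String) :
    cs_countDU (p :: cs_collapseGo p (cs_events l)) = cs_h (decide (p = "down")) l := by
  induction l generalizing p with
  | nil => simp [cs_events, cs_countDU, cs_collapseGo, cs_h]
  | cons a l ih =>
    rw [cs_events_cons]
    by_cases h1 : a < 90
    · simp only [if_pos h1, cs_h]
      by_cases hp : p = "down"
      · subst hp; simpa [cs_collapseGo] using ih "down"
      · have hne : ¬("down" = p) := fun h => hp h.symm
        simp only [cs_collapseGo, if_neg hne, cs_countDU]
        have := ih "down"
        simp_all
    · by_cases h2 : a > 170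
      · simp only [if_neg h1, if_pos h2, cs_h]
        by_cases hp : p = "up"
        · subst hp; simpa [cs_collapseGo] using ih "up"
        · have hne : ¬("up" = p) := fun h => hp h.symm
          simp only [cs_collapseGo, if_neg hne, cs_countDU]
          have := ih "up"
          by_cases hd : p = "down" <;> simp_all
      · simp only [if_neg h1, if_neg h2, cs_h]
        simpa [h1, h2] using ih p

-- a leading "up" sentinel changes nothing: the pair ("up", x) never counts
theorem cs_B_top (es : List String) :
    cs_countDU ("up" :: cs_collapseGo "up" es) = cs_countDU (cs_collapse es) := by
  cases es with
  | nil => simp [cs_collapseGo, cs_collapse, cs_countDU]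
  | cons x xs =>
    by_cases hx : x = "up" <;>
      simp [cs_collapseGo, cs_collapse, cs_countDU, hx]

-- ===== VERDICT (by name: the statement is the Claim_ definition above) =====
theorem count_squats_spec : Claim_equal_count_squats := by
  intro l _
  show count_squats l = count_squats_alt l
  rw [count_squats, count_squats_alt, cs_A_loop, ← cs_B_top, cs_B_go]
  simp
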